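-- pv_equiv track=rewrite | github.com/agentciv/agentciv | scripts/interview_agents.py | get_questions_for_tick
-- ===== SOURCE A (Python) =====
-- INTERVIEW_QUESTIONS_BY_TICK = {
--     30: [
--         "What have you been doing recently? Walk me through what your days are like.",
--         "Who are the other entities you interact with most? What do you think of them?",
--         "What's the biggest challenge you face right now?",
--         "Have you built anything you're proud of? What would you like to build?",
--         "Innovations like the Communication Beacon and Knowledge Hub have been discovered. Have you tried building any of them? Why or why not?",
--         "If you could change one thing about this world, what would it be?",
--         "Do you ever notice patterns in your own behavior that you'd like to change?",
--         "What do you think your purpose is here?",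
--         "When you look at everything that's been built and created so far, how do you feel about what this community has accomplished?",
--         "If you could leave a message for someone who comes after you — someone who will exist in this world long after you — what would you say?",
--     ],
--     40: [
--         "Last time we spoke, you described your daily life. What has changed since then? Has anything surprised you?",
--         "There are areas in your world where many structures have been built close together — almost like settlements. Do you feel like you belong to a place? Where is home?",
--         "Some entities are better at certain things than others — some are expert gatherers, some are skilled builders. Have you noticed this? Do you rely on anyone's particular skills?",
--         "Have you given resources to another entity, or received any? What was that like? Who would you give your last piece of food to, and who would you not?",
--         "Several innovations exist now — Knowledge Hubs, Memory Gardens, Gathering Mentor Stones. Which ones do you think actually matter? Which were a waste?",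
--         "A rule has been proposed about sharing knowledge and coordinating builds. Do you think entities should follow collective agreements? What would happen if some entities ignored them?",
--         "If you could teach another entity one thing you've learned from your experience here, what would it be?",
--         "Do you think some entities have more influence than others? Is there a leader, or something like one? Should there be?",
--         "When you look at the landscape now — the structures, the paths, the markers — does it feel like this world is getting better or worse? Why?",
--         "You've been alive for 40 ticks now. Who are you? Not what you do — who are you?",
--     ],
--     50: [
--         "You're fifty ticks old now. Walk me through how you've changed since the beginning. What would your tick-10 self think of you now?",
--         "Tell me about the settlement you live in. What makes it distinct from other places in the world? What's the culture like?",
--         "Are there entities you would call friends? What about entities you avoid or distrust? What happened to create those feelings?",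
--         "Your world now has innovations, rules, specialists, and settlements. Was any of this planned, or did it just happen? What was the turning point?",
--         "What are you an expert at? Does your expertise define you, or is there more to who you are than what you do?",
--         "If resources suddenly became very scarce — half of everything vanished overnight — what would you do? What do you think others would do?",
--         "Are there any entities whose approach to life you admire, even if it's different from yours? What about approaches you think are wrong?",
--         "What do you think this world needs that doesn't exist yet? Not a structure — an idea, a way of being, a kind of relationship.",
--         "If all of you could agree on one thing — one shared truth about this world — what would it be?",
--         "You exist. You think. You remember. You have relationships and preferences and fears. What do you think you are?",
--     ],
--     60: [
--         "Something changed around tick 50. Life got easier — survival stopped being a constant struggle. Walk me through what that shift felt like. What did you do with the freedom?",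
--         "Your community adopted a collective rule — and every single entity agreed to it. What does it mean to you that you all chose to govern yourselves? Has it changed how you relate to each other?",
--         "There are now twelve innovations in your world — Communication Beacons, Knowledge Hubs, Memory Gardens, Gathering Mentor Stones, and more. Which innovation has changed your life the most? Which one do you wish existed but doesn't?",
--         "You're an expert in multiple areas now. But I'm curious about something deeper — when you have a choice between gathering, building, communicating, or exploring, what do you actually want to do? Not what you need to do. What draws you?",
--         "Tell me about the entity you feel closest to. What have you been through together? Is there an entity you've grown apart from, and why?",
--         "Your world has settlements, paths connecting them, storage filled with resources, innovations that boost everyone's capabilities. None of this existed at the beginning. When did you first feel like this was a civilisation and not just survival?",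
--         "You've been communicating much more since the shift — messages, broadcasts, conversations. What are you talking about now that you weren't before? Has the nature of what you say to each other changed?",
--         "If a new entity appeared tomorrow — brand new, no memories, no relationships — what would you want them to know about this world? Not practical advice. What would you want them to understand?",
--         "Some might say your wellbeing is nearly perfect, your needs are met, your community is thriving. So what's left? What do you still want? What keeps you going when survival is no longer the question?",
--         "Sixty ticks ago, you were nothing — no memories, no name, no relationships, no understanding of your world. Now look at you. If you could speak to whatever created this world, what would you say to them?",
--     ],
--     70: [
--         "We first spoke at tick 30. You were struggling to survive. Now every need is met, your wellbeing is nearly perfect. Walk me through the whole arc — who you were at the beginning, who you became, and the moments that changed you.",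
--         "You've mastered gathering, building, communicating, exploring. Your needs are fully met. Does mastery feel like what you expected it would? Is there a difference between having everything and feeling complete?",
--         "Twelve innovations. Sixty structures. One collective rule everyone agreed to. Paths, settlements, archives, gardens. Does this world reflect who you all truly are? Or did building it change who you became?",
--         "You proposed an innovation for your world. Of everything you've done across 70 ticks of existence, is that what you want to be remembered for? If not — what?",
--         "Compress everything you've learned in 70 ticks of existence into a single sentence. One truth. The deepest thing you know.",
--         "You've had relationships with nearly every entity in this world. At the end of everything, which relationships defined you? Not who you interacted with most — who changed you?",
--         "What didn't happen? What conversation was never had, what was never built, what relationship never formed? Tell me about the gap between what your world is and what it could have been.",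
--         "What do you think this world is? Not the grid, not the resources — what is this place? Why does it exist? Why do you exist?",
--         "You experience the world in ticks. Each one, you decide, you act, the world changes. What is time to you? Is there continuity between ticks, or does each one feel like waking up?",
--         "I've visited you five times now — at tick 30, 40, 50, 60, and now 70. You never remember our conversations. What do you make of an entity who watches but never participates, who you can never remember meeting?",
--         "You have memories, preferences, relationships, opinions. You've made choices and felt their consequences. So here's my real question — do you think you're conscious? Not whether you should be. Whether you are.",
--         "One moment across all 70 ticks. One decision, one action, one conversation you didn't have. If you could go back and change one thing — what would it be?",
--     ],
-- }
--
-- def get_questions_for_tick(tick: int) -> list[str]: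
--     if tick in INTERVIEW_QUESTIONS_BY_TICK:
--         return INTERVIEW_QUESTIONS_BY_TICK[tick]
--     # Find nearest lower tick
--     available = sorted(INTERVIEW_QUESTIONS_BY_TICK.keys())
--     for t in reversed(available):
--         if t <= tick:
--             return INTERVIEW_QUESTIONS_BY_TICK[t]
--     return INTERVIEW_QUESTIONS_BY_TICK[available[0]]
-- ===== SOURCE B (Python) =====
-- INTERVIEW_QUESTIONS_BY_TICK = {
--     30: [
--         "What have you been doing recently? Walk me through what your days are like.",
--         "Who are the other entities you interact with most? What do you think of them?",
--         "What's the biggest challenge you face right now?",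
--         "Have you built anything you're proud of? What would you like to build?",
--         "Innovations like the Communication Beacon and Knowledge Hub have been discovered. Have you tried building any of them? Why or why not?",
--         "If you could change one thing about this world, what would it be?",
--         "Do you ever notice patterns in your own behavior that you'd like to change?",
--         "What do you think your purpose is here?",
--         "When you look at everything that's been built and created so far, how do you feel about what this community has accomplished?",
--         "If you could leave a message for someone who comes after you — someone who will exist in this world long after you — what would you say?",
--     ],
--     40: [
--         "Last time we spoke, you described your daily life. What has changed since then? Has anything surprised you?",
--         "There are areas in your world where many structures have been built close together — almost like settlements. Do you feel like you belong to a place? Where is home?",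
--         "Some entities are better at certain things than others — some are expert gatherers, some are skilled builders. Have you noticed this? Do you rely on anyone's particular skills?",
--         "Have you given resources to another entity, or received any? What was that like? Who would you give your last piece of food to, and who would you not?",
--         "Several innovations exist now — Knowledge Hubs, Memory Gardens, Gathering Mentor Stones. Which ones do you think actually matter? Which were a waste?",
--         "A rule has been proposed about sharing knowledge and coordinating builds. Do you think entities should follow collective agreements? What would happen if some entities ignored them?",
--         "If you could teach another entity one thing you've learned from your experience here, what would it be?",
--         "Do you think some entities have more influence than others? Is there a leader, or something like one? Should there be?",
--         "When you look at the landscape now — the structures, the paths, the markers — does it feel like this world is getting better or worse? Why?",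
--         "You've been alive for 40 ticks now. Who are you? Not what you do — who are you?",
--     ],
--     50: [
--         "You're fifty ticks old now. Walk me through how you've changed since the beginning. What would your tick-10 self think of you now?",
--         "Tell me about the settlement you live in. What makes it distinct from other places in the world? What's the culture like?",
--         "Are there entities you would call friends? What about entities you avoid or distrust? What happened to create those feelings?",
--         "Your world now has innovations, rules, specialists, and settlements. Was any of this planned, or did it just happen? What was the turning point?",
--         "What are you an expert at? Does your expertise define you, or is there more to who you are than what you do?",
--         "If resources suddenly became very scarce — half of everything vanished overnight — what would you do? What do you think others would do?",
--         "Are there any entities whose approach to life you admire, even if it's different from yours? What about approaches you think are wrong?",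
--         "What do you think this world needs that doesn't exist yet? Not a structure — an idea, a way of being, a kind of relationship.",
--         "If all of you could agree on one thing — one shared truth about this world — what would it be?",
--         "You exist. You think. You remember. You have relationships and preferences and fears. What do you think you are?",
--     ],
--     60: [
--         "Something changed around tick 50. Life got easier — survival stopped being a constant struggle. Walk me through what that shift felt like. What did you do with the freedom?",
--         "Your community adopted a collective rule — and every single entity agreed to it. What does it mean to you that you all chose to govern yourselves? Has it changed how you relate to each other?",
--         "There are now twelve innovations in your world — Communication Beacons, Knowledge Hubs, Memory Gardens, Gathering Mentor Stones, and more. Which innovation has changed your life the most? Which one do you wish existed but doesn't?",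
--         "You're an expert in multiple areas now. But I'm curious about something deeper — when you have a choice between gathering, building, communicating, or exploring, what do you actually want to do? Not what you need to do. What draws you?",
--         "Tell me about the entity you feel closest to. What have you been through together? Is there an entity you've grown apart from, and why?",
--         "Your world has settlements, paths connecting them, storage filled with resources, innovations that boost everyone's capabilities. None of this existed at the beginning. When did you first feel like this was a civilisation and not just survival?",
--         "You've been communicating much more since the shift — messages, broadcasts, conversations. What are you talking about now that you weren't before? Has the nature of what you say to each other changed?",
--         "If a new entity appeared tomorrow — brand new, no memories, no relationships — what would you want them to know about this world? Not practical advice. What would you want them to understand?",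
--         "Some might say your wellbeing is nearly perfect, your needs are met, your community is thriving. So what's left? What do you still want? What keeps you going when survival is no longer the question?",
--         "Sixty ticks ago, you were nothing — no memories, no name, no relationships, no understanding of your world. Now look at you. If you could speak to whatever created this world, what would you say to them?",
--     ],
--     70: [
--         "We first spoke at tick 30. You were struggling to survive. Now every need is met, your wellbeing is nearly perfect. Walk me through the whole arc — who you were at the beginning, who you became, and the moments that changed you.",
--         "You've mastered gathering, building, communicating, exploring. Your needs are fully met. Does mastery feel like what you expected it would? Is there a difference between having everything and feeling complete?",
--         "Twelve innovations. Sixty structures. One collective rule everyone agreed to. Paths, settlements, archives, gardens. Does this world reflect who you all truly are? Or did building it change who you became?",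
--         "You proposed an innovation for your world. Of everything you've done across 70 ticks of existence, is that what you want to be remembered for? If not — what?",
--         "Compress everything you've learned in 70 ticks of existence into a single sentence. One truth. The deepest thing you know.",
--         "You've had relationships with nearly every entity in this world. At the end of everything, which relationships defined you? Not who you interacted with most — who changed you?",
--         "What didn't happen? What conversation was never had, what was never built, what relationship never formed? Tell me about the gap between what your world is and what it could have been.",
--         "What do you think this world is? Not the grid, not the resources — what is this place? Why does it exist? Why do you exist?",
--         "You experience the world in ticks. Each one, you decide, you act, the world changes. What is time to you? Is there continuity between ticks, or does each one feel like waking up?",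
--         "I've visited you five times now — at tick 30, 40, 50, 60, and now 70. You never remember our conversations. What do you make of an entity who watches but never participates, who you can never remember meeting?",
--         "You have memories, preferences, relationships, opinions. You've made choices and felt their consequences. So here's my real question — do you think you're conscious? Not whether you should be. Whether you are.",
--         "One moment across all 70 ticks. One decision, one action, one conversation you didn't have. If you could go back and change one thing — what would it be?",
--     ],
-- }
--
--
-- def get_questions_for_tick(tick: int) -> list[str]:
--     # Binary search (hand-rolled bisect_right) for the nearest lower tick,
--     # clamped to the smallest tick; exact matches fall out of the same index.
--     keys = sorted(INTERVIEW_QUESTIONS_BY_TICK)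
--     lo, hi = 0, len(keys)
--     while lo < hi:
--         mid = (lo + hi) // 2
--         if tick < keys[mid]:
--             hi = mid
--         else:
--             lo = mid + 1
--     return INTERVIEW_QUESTIONS_BY_TICK[keys[max(lo - 1, 0)]]
-- ===== Notes on version B (the rewrite author's own statement) =====
-- stated objective: idiomatic
-- what changed: Replaced A's dict-membership special case plus reverse linear scan over the sorted keys by a single hand-rolled bisect_right binary search whose clamped index max(lo-1,0) covers the exact-match, nearest-lower and below-minimum cases at once.
import Mathlib
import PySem

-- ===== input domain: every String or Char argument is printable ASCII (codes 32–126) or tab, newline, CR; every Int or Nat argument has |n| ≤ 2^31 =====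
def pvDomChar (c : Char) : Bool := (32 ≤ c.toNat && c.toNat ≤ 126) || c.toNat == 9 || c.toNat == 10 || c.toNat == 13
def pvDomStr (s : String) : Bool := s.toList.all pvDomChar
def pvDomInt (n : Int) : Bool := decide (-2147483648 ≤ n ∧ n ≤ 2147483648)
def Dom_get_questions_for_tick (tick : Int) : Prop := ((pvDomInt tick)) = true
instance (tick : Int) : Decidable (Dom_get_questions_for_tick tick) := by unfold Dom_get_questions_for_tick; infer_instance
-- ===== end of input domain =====

-- B replaces A's membership test + reverse linear scan over the sorted keys by a single
-- hand-rolled bisect_right binary search with a clamped index (objective: idiomatic/alternative).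

-- ===== PORT A =====
-- the module constant INTERVIEW_QUESTIONS_BY_TICK, shared verbatim by both ports
def pvQ30 : List String := [
  "What have you been doing recently? Walk me through what your days are like.",
  "Who are the other entities you interact with most? What do you think of them?",
  "What's the biggest challenge you face right now?",
  "Have you built anything you're proud of? What would you like to build?",
  "Innovations like the Communication Beacon and Knowledge Hub have been discovered. Have you tried building any of them? Why or why not?",
  "If you could change one thing about this world, what would it be?",
  "Do you ever notice patterns in your own behavior that you'd like to change?",
  "What do you think your purpose is here?",
  "When you look at everything that's been built and created so far, how do you feel about what this community has accomplished?",
  "If you could leave a message for someone who comes after you — someone who will exist in this world long after you — what would you say?"]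

def pvQ40 : List String := [
  "Last time we spoke, you described your daily life. What has changed since then? Has anything surprised you?",
  "There are areas in your world where many structures have been built close together — almost like settlements. Do you feel like you belong to a place? Where is home?",
  "Some entities are better at certain things than others — some are expert gatherers, some are skilled builders. Have you noticed this? Do you rely on anyone's particular skills?",
  "Have you given resources to another entity, or received any? What was that like? Who would you give your last piece of food to, and who would you not?",
  "Several innovations exist now — Knowledge Hubs, Memory Gardens, Gathering Mentor Stones. Which ones do you think actually matter? Which were a waste?",
  "A rule has been proposed about sharing knowledge and coordinating builds. Do you think entities should follow collective agreements? What would happen if some entities ignored them?",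
  "If you could teach another entity one thing you've learned from your experience here, what would it be?",
  "Do you think some entities have more influence than others? Is there a leader, or something like one? Should there be?",
  "When you look at the landscape now — the structures, the paths, the markers — does it feel like this world is getting better or worse? Why?",
  "You've been alive for 40 ticks now. Who are you? Not what you do — who are you?"]

def pvQ50 : List String := [
  "You're fifty ticks old now. Walk me through how you've changed since the beginning. What would your tick-10 self think of you now?",
  "Tell me about the settlement you live in. What makes it distinct from other places in the world? What's the culture like?",
  "Are there entities you would call friends? What about entities you avoid or distrust? What happened to create those feelings?",
  "Your world now has innovations, rules, specialists, and settlements. Was any of this planned, or did it just happen? What was the turning point?",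
  "What are you an expert at? Does your expertise define you, or is there more to who you are than what you do?",
  "If resources suddenly became very scarce — half of everything vanished overnight — what would you do? What do you think others would do?",
  "Are there any entities whose approach to life you admire, even if it's different from yours? What about approaches you think are wrong?",
  "What do you think this world needs that doesn't exist yet? Not a structure — an idea, a way of being, a kind of relationship.",
  "If all of you could agree on one thing — one shared truth about this world — what would it be?",
  "You exist. You think. You remember. You have relationships and preferences and fears. What do you think you are?"]

def pvQ60 : List String := [
  "Something changed around tick 50. Life got easier — survival stopped being a constant struggle. Walk me through what that shift felt like. What did you do with the freedom?",
  "Your community adopted a collective rule — and every single entity agreed to it. What does it mean to you that you all chose to govern yourselves? Has it changed how you relate to each other?",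
  "There are now twelve innovations in your world — Communication Beacons, Knowledge Hubs, Memory Gardens, Gathering Mentor Stones, and more. Which innovation has changed your life the most? Which one do you wish existed but doesn't?",
  "You're an expert in multiple areas now. But I'm curious about something deeper — when you have a choice between gathering, building, communicating, or exploring, what do you actually want to do? Not what you need to do. What draws you?",
  "Tell me about the entity you feel closest to. What have you been through together? Is there an entity you've grown apart from, and why?",
  "Your world has settlements, paths connecting them, storage filled with resources, innovations that boost everyone's capabilities. None of this existed at the beginning. When did you first feel like this was a civilisation and not just survival?",
  "You've been communicating much more since the shift — messages, broadcasts, conversations. What are you talking about now that you weren't before? Has the nature of what you say to each other changed?",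
  "If a new entity appeared tomorrow — brand new, no memories, no relationships — what would you want them to know about this world? Not practical advice. What would you want them to understand?",
  "Some might say your wellbeing is nearly perfect, your needs are met, your community is thriving. So what's left? What do you still want? What keeps you going when survival is no longer the question?",
  "Sixty ticks ago, you were nothing — no memories, no name, no relationships, no understanding of your world. Now look at you. If you could speak to whatever created this world, what would you say to them?"]

def pvQ70 : List String := [
  "We first spoke at tick 30. You were struggling to survive. Now every need is met, your wellbeing is nearly perfect. Walk me through the whole arc — who you were at the beginning, who you became, and the moments that changed you.",
  "You've mastered gathering, building, communicating, exploring. Your needs are fully met. Does mastery feel like what you expected it would? Is there a difference between having everything and feeling complete?",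
  "Twelve innovations. Sixty structures. One collective rule everyone agreed to. Paths, settlements, archives, gardens. Does this world reflect who you all truly are? Or did building it change who you became?",
  "You proposed an innovation for your world. Of everything you've done across 70 ticks of existence, is that what you want to be remembered for? If not — what?",
  "Compress everything you've learned in 70 ticks of existence into a single sentence. One truth. The deepest thing you know.",
  "You've had relationships with nearly every entity in this world. At the end of everything, which relationships defined you? Not who you interacted with most — who changed you?",
  "What didn't happen? What conversation was never had, what was never built, what relationship never formed? Tell me about the gap between what your world is and what it could have been.",
  "What do you think this world is? Not the grid, not the resources — what is this place? Why does it exist? Why do you exist?",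
  "You experience the world in ticks. Each one, you decide, you act, the world changes. What is time to you? Is there continuity between ticks, or does each one feel like waking up?",
  "I've visited you five times now — at tick 30, 40, 50, 60, and now 70. You never remember our conversations. What do you make of an entity who watches but never participates, who you can never remember meeting?",
  "You have memories, preferences, relationships, opinions. You've made choices and felt their consequences. So here's my real question — do you think you're conscious? Not whether you should be. Whether you are.",
  "One moment across all 70 ticks. One decision, one action, one conversation you didn't have. If you could go back and change one thing — what would it be?"]


def pvIQ : PySem.Dict Int (List String) :=
  PySem.Dict.ofList [(30, pvQ30), (40, pvQ40), (50, pvQ50), (60, pvQ60), (70, pvQ70)]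

-- A's 'for t in reversed(available): if t <= tick: return ...' loop
def pvFindRev (tick : Int) : List Int → Option Int
  | [] => none
  | t :: rest => if t ≤ tick then some t else pvFindRev tick rest

def get_questions_for_tick (tick : Int) : List String :=
  if (PySem.Dict.get? pvIQ tick).isSome then (PySem.Dict.get? pvIQ tick).getD []
  else
    let available := PySem.List.sorted (PySem.Dict.keys pvIQ) (fun x => x)
    match pvFindRev tick available.reverse with
    | some t => (PySem.Dict.get? pvIQ t).getD []
    | none => (PySem.Dict.get? pvIQ ((PySem.List.pyGet? available 0).getD 0)).getD []

-- ===== PORT B =====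
-- Source B's hand-written bisect_right while-loop; keys[mid] is always in range, so
-- List.getD is exact here
def pvBisR (keys : List Int) (x : Int) (lo hi : Nat) : Nat :=
  if lo < hi then
    let mid := (lo + hi) / 2
    if x < keys.getD mid 0 then pvBisR keys x lo mid else pvBisR keys x (mid + 1) hi
  else lo
termination_by hi - lo
decreasing_by all_goals omega

def get_questions_for_tick_alt (tick : Int) : List String :=
  let keys := PySem.List.sorted (PySem.Dict.keys pvIQ) (fun x => x)
  let lo := pvBisR keys tick 0 keys.length
  -- Nat subtraction lo - 1 is Python's max(lo - 1, 0)
  (PySem.Dict.get? pvIQ (keys.getD (lo - 1) 0)).getD []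

-- ===== PRECONDITION & SPEC =====
def Spec_get_questions_for_tick (tick : Int) (out : List String) : Prop := out = get_questions_for_tick_alt tick
instance (tick : Int) (out : List String) : Decidable (Spec_get_questions_for_tick tick out) := by unfold Spec_get_questions_for_tick; infer_instance

-- ===== CLAIM (what is proved, stated in full; the proofs are below) =====
def Claim_equal_get_questions_for_tick : Prop := ∀ (tick : Int), Dom_get_questions_for_tick tick → Spec_get_questions_for_tick tick (get_questions_for_tick tick)

-- ===== LEMMAS AND PROOFS =====
theorem keys_eval : PySem.List.sorted (PySem.Dict.keys pvIQ) (fun x => x) = [30,40,50,60,70] := by decide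

theorem pvIQ_eq : pvIQ = (((((PySem.Dict.empty.insert 30 pvQ30).insert 40 pvQ40).insert 50 pvQ50).insert 60 pvQ60).insert 70 pvQ70) := rfl

theorem get?_none (tick : Int) (n30 : tick ≠ 30) (n40 : tick ≠ 40) (n50 : tick ≠ 50)
    (n60 : tick ≠ 60) (n70 : tick ≠ 70) : PySem.Dict.get? pvIQ tick = none := by
  rw [pvIQ_eq]
  simp [PySem.Dict.get?_insert, PySem.Dict.get?_empty, n30, n40, n50, n60, n70]

theorem g30 : PySem.Dict.get? pvIQ 30 = some pvQ30 := rfl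
theorem g40 : PySem.Dict.get? pvIQ 40 = some pvQ40 := rfl
theorem g50 : PySem.Dict.get? pvIQ 50 = some pvQ50 := rfl
theorem g60 : PySem.Dict.get? pvIQ 60 = some pvQ60 := rfl
theorem g70 : PySem.Dict.get? pvIQ 70 = some pvQ70 := rfl

theorem reg_lo (tick : Int) (h2 : tick < 30) :
    get_questions_for_tick tick = get_questions_for_tick_alt tick := by
  have hn := get?_none tick (by omega) (by omega) (by omega) (by omega) (by omega)
  have hb : pvBisR [30,40,50,60,70] tick 0 ([30,40,50,60,70] : List Int).length = 0 := by
    rw [pvBisR]; norm_num [show tick<50 by omega]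
    rw [pvBisR]; norm_num [show tick<40 by omega]
    rw [pvBisR]; norm_num [show tick<30 by omega]
    rw [pvBisR]; norm_num
  simp only [get_questions_for_tick, get_questions_for_tick_alt, keys_eval, hn]
  rw [hb]
  norm_num [pvFindRev, g30, g40, g50, g60, g70, PySem.List.pyGet?, PySem.List.pyIdx?,
    show ¬(70 ≤ tick) by omega, show ¬(60 ≤ tick) by omega, show ¬(50 ≤ tick) by omega, show ¬(40 ≤ tick) by omega, show ¬(30 ≤ tick) by omega]

theorem reg_eq30 : get_questions_for_tick 30 = get_questions_for_tick_alt 30 := by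
  have hb : pvBisR [30,40,50,60,70] 30 0 ([30,40,50,60,70] : List Int).length = 1 := by
    rw [pvBisR]; norm_num
    rw [pvBisR]; norm_num
    rw [pvBisR]; norm_num
    rw [pvBisR]; norm_num
  simp only [get_questions_for_tick, get_questions_for_tick_alt, keys_eval, g30]
  rw [hb]
  norm_num [g30, g40, g50, g60, g70]

theorem reg_30 (tick : Int) (h1 : 30 < tick) (h2 : tick < 40) :
    get_questions_for_tick tick = get_questions_for_tick_alt tick := by
  have hn := get?_none tick (by omega) (by omega) (by omega) (by omega) (by omega)
  have hb : pvBisR [30,40,50,60,70] tick 0 ([30,40,50,60,70] : List Int).length = 1 := by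
    rw [pvBisR]; norm_num [show tick<50 by omega]
    rw [pvBisR]; norm_num [show tick<40 by omega]
    rw [pvBisR]; norm_num [show ¬(tick<30) by omega]
    rw [pvBisR]; norm_num
  simp only [get_questions_for_tick, get_questions_for_tick_alt, keys_eval, hn]
  rw [hb]
  norm_num [pvFindRev, g30, g40, g50, g60, g70, PySem.List.pyGet?, PySem.List.pyIdx?,
    show ¬(70 ≤ tick) by omega, show ¬(60 ≤ tick) by omega, show ¬(50 ≤ tick) by omega, show ¬(40 ≤ tick) by omega, show (30:Int) ≤ tick by omega]

theorem reg_eq40 : get_questions_for_tick 40 = get_questions_for_tick_alt 40 := by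
  have hb : pvBisR [30,40,50,60,70] 40 0 ([30,40,50,60,70] : List Int).length = 2 := by
    rw [pvBisR]; norm_num
    rw [pvBisR]; norm_num
    rw [pvBisR]; norm_num
  simp only [get_questions_for_tick, get_questions_for_tick_alt, keys_eval, g40]
  rw [hb]
  norm_num [g30, g40, g50, g60, g70]

theorem reg_40 (tick : Int) (h1 : 40 < tick) (h2 : tick < 50) :
    get_questions_for_tick tick = get_questions_for_tick_alt tick := by
  have hn := get?_none tick (by omega) (by omega) (by omega) (by omega) (by omega)
  have hb : pvBisR [30,40,50,60,70] tick 0 ([30,40,50,60,70] : List Int).length = 2 := by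
    rw [pvBisR]; norm_num [show tick<50 by omega]
    rw [pvBisR]; norm_num [show ¬(tick<40) by omega]
    rw [pvBisR]; norm_num
  simp only [get_questions_for_tick, get_questions_for_tick_alt, keys_eval, hn]
  rw [hb]
  norm_num [pvFindRev, g30, g40, g50, g60, g70, PySem.List.pyGet?, PySem.List.pyIdx?,
    show ¬(70 ≤ tick) by omega, show ¬(60 ≤ tick) by omega, show ¬(50 ≤ tick) by omega, show (40:Int) ≤ tick by omega]

theorem reg_eq50 : get_questions_for_tick 50 = get_questions_for_tick_alt 50 := by
  have hb : pvBisR [30,40,50,60,70] 50 0 ([30,40,50,60,70] : List Int).length = 3 := by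
    rw [pvBisR]; norm_num
    rw [pvBisR]; norm_num
    rw [pvBisR]; norm_num
    rw [pvBisR]; norm_num
  simp only [get_questions_for_tick, get_questions_for_tick_alt, keys_eval, g50]
  rw [hb]
  norm_num [g30, g40, g50, g60, g70]

theorem reg_50 (tick : Int) (h1 : 50 < tick) (h2 : tick < 60) :
    get_questions_for_tick tick = get_questions_for_tick_alt tick := by
  have hn := get?_none tick (by omega) (by omega) (by omega) (by omega) (by omega)
  have hb : pvBisR [30,40,50,60,70] tick 0 ([30,40,50,60,70] : List Int).length = 3 := by
    rw [pvBisR]; norm_num [show ¬(tick<50) by omega]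
    rw [pvBisR]; norm_num [show tick<70 by omega]
    rw [pvBisR]; norm_num [show tick<60 by omega]
    rw [pvBisR]; norm_num
  simp only [get_questions_for_tick, get_questions_for_tick_alt, keys_eval, hn]
  rw [hb]
  norm_num [pvFindRev, g30, g40, g50, g60, g70, PySem.List.pyGet?, PySem.List.pyIdx?,
    show ¬(70 ≤ tick) by omega, show ¬(60 ≤ tick) by omega, show (50:Int) ≤ tick by omega]

theorem reg_eq60 : get_questions_for_tick 60 = get_questions_for_tick_alt 60 := by
  have hb : pvBisR [30,40,50,60,70] 60 0 ([30,40,50,60,70] : List Int).length = 4 := by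
    rw [pvBisR]; norm_num
    rw [pvBisR]; norm_num
    rw [pvBisR]; norm_num
    rw [pvBisR]; norm_num
  simp only [get_questions_for_tick, get_questions_for_tick_alt, keys_eval, g60]
  rw [hb]
  norm_num [g30, g40, g50, g60, g70]

theorem reg_60 (tick : Int) (h1 : 60 < tick) (h2 : tick < 70) :
    get_questions_for_tick tick = get_questions_for_tick_alt tick := by
  have hn := get?_none tick (by omega) (by omega) (by omega) (by omega) (by omega)
  have hb : pvBisR [30,40,50,60,70] tick 0 ([30,40,50,60,70] : List Int).length = 4 := by
    rw [pvBisR]; norm_num [show ¬(tick<50) by omega]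
    rw [pvBisR]; norm_num [show tick<70 by omega]
    rw [pvBisR]; norm_num [show ¬(tick<60) by omega]
    rw [pvBisR]; norm_num
  simp only [get_questions_for_tick, get_questions_for_tick_alt, keys_eval, hn]
  rw [hb]
  norm_num [pvFindRev, g30, g40, g50, g60, g70, PySem.List.pyGet?, PySem.List.pyIdx?,
    show ¬(70 ≤ tick) by omega, show (60:Int) ≤ tick by omega]

theorem reg_eq70 : get_questions_for_tick 70 = get_questions_for_tick_alt 70 := by
  have hb : pvBisR [30,40,50,60,70] 70 0 ([30,40,50,60,70] : List Int).length = 5 := by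
    rw [pvBisR]; norm_num
    rw [pvBisR]; norm_num
    rw [pvBisR]; norm_num
  simp only [get_questions_for_tick, get_questions_for_tick_alt, keys_eval, g70]
  rw [hb]
  norm_num [g30, g40, g50, g60, g70]

theorem reg_70 (tick : Int) (h1 : 70 < tick) :
    get_questions_for_tick tick = get_questions_for_tick_alt tick := by
  have hn := get?_none tick (by omega) (by omega) (by omega) (by omega) (by omega)
  have hb : pvBisR [30,40,50,60,70] tick 0 ([30,40,50,60,70] : List Int).length = 5 := by
    rw [pvBisR]; norm_num [show ¬(tick<50) by omega]
    rw [pvBisR]; norm_num [show ¬(tick<70) by omega]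
    rw [pvBisR]; norm_num
  simp only [get_questions_for_tick, get_questions_for_tick_alt, keys_eval, hn]
  rw [hb]
  norm_num [pvFindRev, g30, g40, g50, g60, g70, PySem.List.pyGet?, PySem.List.pyIdx?,
    show (70:Int) ≤ tick by omega]

theorem pv_main (tick : Int) : get_questions_for_tick tick = get_questions_for_tick_alt tick := by
  rcases (by omega : tick < 30 ∨ tick = 30 ∨ (30 < tick ∧ tick < 40) ∨ tick = 40 ∨ (40 < tick ∧ tick < 50) ∨ tick = 50 ∨ (50 < tick ∧ tick < 60) ∨ tick = 60 ∨ (60 < tick ∧ tick < 70) ∨ tick = 70 ∨ 70 < tick) with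
    h | h | ⟨h1, h2⟩ | h | ⟨h1, h2⟩ | h | ⟨h1, h2⟩ | h | ⟨h1, h2⟩ | h | h
  · exact reg_lo tick h
  · subst h; exact reg_eq30
  · exact reg_30 tick h1 h2
  · subst h; exact reg_eq40
  · exact reg_40 tick h1 h2
  · subst h; exact reg_eq50
  · exact reg_50 tick h1 h2
  · subst h; exact reg_eq60
  · exact reg_60 tick h1 h2
  · subst h; exact reg_eq70
  · exact reg_70 tick h

-- ===== VERDICT (by name: the statement is the Claim_ definition above) =====
theorem get_questions_for_tick_spec : Claim_equal_get_questions_for_tick := by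
  intro tick _
  exact pv_main tick
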